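-- pv_equiv track=rewrite | github.com/mazariks/ITI0102 | iti0102-2020-master/KT/kt1/exam.py | sum_half_evens
-- ===== SOURCE A (Python) =====
-- def sum_half_evens(nums: list) -> int:
--     """
--     Return the sum of first half of even ints in the given array.
--
--     If there are odd number of even numbers, then include the middle number.
--
--     sum_half_evens([2, 1, 2, 3, 4]) => 4
--     sum_half_evens([2, 2, 0, 4]) => 4
--     sum_half_evens([1, 3, 5, 8]) => 8
--     sum_half_evens([2, 3, 5, 7, 8, 9, 10, 11]) => 10
--     """
--     even_list = []
--     for value in nums:
--         if value % 2 == 0: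
--             even_list.append(value)
--     middle_index = len(even_list) // 2
--     correct_list = even_list[:middle_index + 1]
--     return sum(correct_list)
-- ===== SOURCE B (Python) =====
-- def sum_half_evens(nums: list) -> int:
--     """Sum the first half (middle included) of the even ints, counted first, accumulated second."""
--     count = 0
--     for value in nums:
--         if value % 2 == 0:
--             count += 1
--     remaining = count // 2 + 1
--     total = 0
--     for value in nums:
--         if remaining == 0:
--             break
--         if value % 2 == 0:
--             total += value
--             remaining -= 1
--     return total
-- ===== Notes on version B (the rewrite author's own statement) =====
-- stated objective: simpler
-- what changed: B never builds the even-list or takes a slice: it counts evens in one pass, then accumulates the first count//2+1 evens in a second pass with an early break.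
import Mathlib
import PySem

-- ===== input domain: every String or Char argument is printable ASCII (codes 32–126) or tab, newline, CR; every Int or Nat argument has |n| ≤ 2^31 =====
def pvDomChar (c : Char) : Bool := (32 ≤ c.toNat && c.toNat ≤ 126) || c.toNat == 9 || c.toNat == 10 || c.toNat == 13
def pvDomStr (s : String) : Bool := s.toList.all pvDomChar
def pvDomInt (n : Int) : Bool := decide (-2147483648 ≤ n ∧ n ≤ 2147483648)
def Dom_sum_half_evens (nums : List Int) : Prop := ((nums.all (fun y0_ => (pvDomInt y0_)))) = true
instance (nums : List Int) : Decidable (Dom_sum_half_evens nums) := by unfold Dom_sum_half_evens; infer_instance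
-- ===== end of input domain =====

-- B counts the evens in one pass, then accumulates the first count//2+1 evens in a second
-- pass with an early stop — no intermediate even-list, no slice (objective: simpler).

-- ===== PORT A =====
def sum_half_evens (nums : List Int) : Int :=
  let even_list := nums.foldl (fun acc value => if PySem.Int.mod value 2 = 0 then acc ++ [value] else acc) []
  let middle_index : Int := PySem.Int.floordiv (even_list.length : Int) 2
  let correct_list := PySem.List.slice even_list none (some (middle_index + 1))
  correct_list.sum

-- ===== PORT B =====
-- second pass of Source B: early break once `remaining` evens have been summed
def sheAccum (l : List Int) (remaining : Int) (total : Int) : Int :=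
  match l with
  | [] => total
  | value :: rest =>
    if remaining = 0 then total
    else if PySem.Int.mod value 2 = 0 then sheAccum rest (remaining - 1) (total + value)
    else sheAccum rest remaining total

def sum_half_evens_alt (nums : List Int) : Int :=
  let count := nums.foldl (fun acc value => if PySem.Int.mod value 2 = 0 then acc + 1 else acc) (0 : Int)
  let remaining := PySem.Int.floordiv count 2 + 1
  sheAccum nums remaining 0

-- ===== PRECONDITION & SPEC =====
def Spec_sum_half_evens (nums : List Int) (out : Int) : Prop := out = sum_half_evens_alt nums
instance (nums : List Int) (out : Int) : Decidable (Spec_sum_half_evens nums out) := by unfold Spec_sum_half_evens; infer_instance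

-- ===== CLAIM (what is proved, stated in full; the proofs are below) =====
def Claim_equal_sum_half_evens : Prop := ∀ (nums : List Int), Dom_sum_half_evens nums → Spec_sum_half_evens nums (sum_half_evens nums)

-- ===== LEMMAS AND PROOFS =====

-- B's second pass sums the first `remaining` elements of the even-filter of the list
theorem sheAccum_eq_take_sum (l : List Int) (t total : Int) (ht : 0 ≤ t) :
    sheAccum l t total = total + ((l.filter (fun v => PySem.Int.mod v 2 = 0)).take t.toNat).sum := by
  induction l generalizing t total with
  | nil => simp [sheAccum]
  | cons v rest ih =>
    simp only [sheAccum, List.filter_cons]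
    by_cases h0 : t = 0
    · subst h0; simp
    · have ht1 : 0 ≤ t - 1 := by omega
      have htn : t.toNat = (t - 1).toNat + 1 := by omega
      by_cases he : PySem.Int.mod v 2 = 0
      · simp only [h0, he, if_false, decide_true, if_pos, htn]
        rw [ih _ _ ht1]
        simp [List.take_succ_cons]
        ring
      · simp only [h0, he, if_false, decide_false, Bool.false_eq_true]
        rw [ih _ _ ht]

-- ===== VERDICT (by name: the statement is the Claim_ definition above) =====
theorem sum_half_evens_spec : Claim_equal_sum_half_evens := by
  intro nums _
  show sum_half_evens nums = sum_half_evens_alt nums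
  unfold sum_half_evens sum_half_evens_alt
  simp only []
  show _ = _
  rw [show (fun (acc : List Int) value => if PySem.Int.mod value 2 = 0 then acc ++ [value] else acc)
        = (fun acc x => if decide (PySem.Int.mod x 2 = 0) = true then acc ++ [id x] else acc) from by
        funext acc x; simp,
      show (fun (acc : Int) value => if PySem.Int.mod value 2 = 0 then acc + 1 else acc)
        = (fun acc x => if decide (PySem.Int.mod x 2 = 0) = true then acc + 1 else acc) from by
        funext acc x; simp,
      PySem.List.foldl_append_if (fun v => decide (PySem.Int.mod v 2 = 0)) id,
      PySem.List.foldl_count_if (fun v => decide (PySem.Int.mod v 2 = 0))]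
  simp only [List.map_id, List.nil_append, zero_add, List.countP_eq_length_filter]
  set c := (nums.filter (fun v => decide (PySem.Int.mod v 2 = 0))).length with hc
  have hfd : PySem.Int.floordiv (c : Int) 2 = ((c / 2 : Nat) : Int) := by
    exact_mod_cast PySem.Int.floordiv_natCast c 2
  rw [hfd, PySem.List.slice_to _ (by omega),
      sheAccum_eq_take_sum _ _ _ (by omega)]
  simp only [zero_add]
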